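-- pv_equiv track=rewrite | github.com/roadfoodr/tinware | wrangle/build_2-to-3.py | generate_three_letter_words
-- ===== SOURCE A (Python) =====
-- import string
--
-- def generate_three_letter_words(two_letter_words, valid_words):
--     results = []
--     for word in two_letter_words:
--         before = [(letter + word, word, letter, 'before') for letter in string.ascii_lowercase if letter + word in valid_words]
--         after = [(word + letter, word, letter, 'after') for letter in string.ascii_lowercase if word + letter in valid_words]
--
--         # Add placeholder if no valid words found
--         if not before:
--             before = [('-', word, '-', 'before')]
--         if not after:
--             after = [('-', word, '-', 'after')]
--
--         results.extend(before + after)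
--     return results
-- ===== SOURCE B (Python) =====
-- def generate_three_letter_words(two_letter_words, valid_words):
--     # One pass over valid_words builds two indexes; then a lookup per word.
--     suffix_map = {}
--     prefix_map = {}
--     for v in valid_words:
--         if v:
--             if 'a' <= v[0] <= 'z':
--                 suffix_map.setdefault(v[1:], set()).add(v[0])
--             if 'a' <= v[-1] <= 'z':
--                 prefix_map.setdefault(v[:-1], set()).add(v[-1])
--     results = []
--     for word in two_letter_words:
--         before = [(l + word, word, l, 'before') for l in sorted(suffix_map.get(word, ()))]
--         if not before:
--             before = [('-', word, '-', 'before')]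
--         after = [(word + l, word, l, 'after') for l in sorted(prefix_map.get(word, ()))]
--         if not after:
--             after = [('-', word, '-', 'after')]
--         results.extend(before)
--         results.extend(after)
--     return results
-- ===== Notes on version B (the rewrite author's own statement) =====
-- stated objective: faster
-- what changed: B replaces A's per-word scan over all 26 letters with two list-membership tests each by one indexing pass over valid_words building a suffix map and a prefix map of extension-letter sets, then answers each word by two dict lookups whose letter sets are sorted into alphabetical order.
import Mathlib
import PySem

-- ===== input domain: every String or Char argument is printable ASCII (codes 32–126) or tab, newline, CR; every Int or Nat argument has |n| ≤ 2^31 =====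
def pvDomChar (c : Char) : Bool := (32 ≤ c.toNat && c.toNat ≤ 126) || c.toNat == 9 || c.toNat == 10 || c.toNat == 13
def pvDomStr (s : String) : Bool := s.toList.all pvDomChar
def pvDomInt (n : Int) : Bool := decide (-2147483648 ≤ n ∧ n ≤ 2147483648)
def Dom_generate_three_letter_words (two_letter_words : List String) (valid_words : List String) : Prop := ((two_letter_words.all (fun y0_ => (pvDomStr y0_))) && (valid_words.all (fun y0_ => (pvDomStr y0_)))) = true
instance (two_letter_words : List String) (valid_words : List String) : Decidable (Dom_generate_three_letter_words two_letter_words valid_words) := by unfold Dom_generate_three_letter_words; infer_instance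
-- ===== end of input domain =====

-- B replaces A's 26-membership-scans-per-word by a single indexing pass over valid_words
-- (a suffix map and a prefix map of extension letters) followed by one sorted lookup per word.

-- ===== PORT A =====
-- string.ascii_lowercase
def pvAsciiLowercase : List Char :=
  ['a','b','c','d','e','f','g','h','i','j','k','l','m',
   'n','o','p','q','r','s','t','u','v','w','x','y','z']

def generate_three_letter_words (two_letter_words : List String) (valid_words : List String) : List (String × String × String × String) :=
  two_letter_words.foldl (fun results word =>
    let before := (pvAsciiLowercase.filter
        (fun letter => valid_words.contains (String.ofList (letter :: word.toList)))).map
      (fun letter => (String.ofList (letter :: word.toList), word, String.ofList [letter], "before"))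
    let after := (pvAsciiLowercase.filter
        (fun letter => valid_words.contains (String.ofList (word.toList ++ [letter])))).map
      (fun letter => (String.ofList (word.toList ++ [letter]), word, String.ofList [letter], "after"))
    let before := if before = [] then [("-", word, "-", "before")] else before
    let after := if after = [] then [("-", word, "-", "after")] else after
    results ++ (before ++ after)) []

-- ===== PORT B =====
-- one iteration of B's indexing loop: file the first/last letter of v under its suffix/prefix key
def pvIndexStep (maps : PySem.Dict String (PySem.Set Char) × PySem.Dict String (PySem.Set Char))
    (v : String) : PySem.Dict String (PySem.Set Char) × PySem.Dict String (PySem.Set Char) :=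
  match v.toList with
  | [] => maps
  | c :: rest =>
    let sm := if 'a' ≤ c && c ≤ 'z' then
        maps.1.modify (String.ofList rest) PySem.Set.empty (fun s => s.add c)
      else maps.1
    let lastc := rest.getLastD c
    let pm := if 'a' ≤ lastc && lastc ≤ 'z' then
        maps.2.modify (String.ofList ((c :: rest).dropLast)) PySem.Set.empty (fun s => s.add lastc)
      else maps.2
    (sm, pm)

def generate_three_letter_words_alt (two_letter_words : List String) (valid_words : List String) : List (String × String × String × String) :=
  let maps := valid_words.foldl pvIndexStep (PySem.Dict.empty, PySem.Dict.empty)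
  two_letter_words.foldl (fun results word =>
    let before := (PySem.List.sorted (maps.1.getD word PySem.Set.empty) (fun x => x) false).map
      (fun l => (String.ofList (l :: word.toList), word, String.ofList [l], "before"))
    let before := if before = [] then [("-", word, "-", "before")] else before
    let after := (PySem.List.sorted (maps.2.getD word PySem.Set.empty) (fun x => x) false).map
      (fun l => (String.ofList (word.toList ++ [l]), word, String.ofList [l], "after"))
    let after := if after = [] then [("-", word, "-", "after")] else after
    results ++ before ++ after) []

-- ===== PRECONDITION & SPEC =====
def Spec_generate_three_letter_words (two_letter_words : List String) (valid_words : List String) (out : List (String × String × String × String)) : Prop := out = generate_three_letter_words_alt two_letter_words valid_words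
instance (two_letter_words : List String) (valid_words : List String) (out : List (String × String × String × String)) : Decidable (Spec_generate_three_letter_words two_letter_words valid_words out) := by unfold Spec_generate_three_letter_words; infer_instance

-- ===== CLAIM (what is proved, stated in full; the proofs are below) =====
def Claim_equal_generate_three_letter_words : Prop := ∀ (two_letter_words : List String) (valid_words : List String), Dom_generate_three_letter_words two_letter_words valid_words → Spec_generate_three_letter_words two_letter_words valid_words (generate_three_letter_words two_letter_words valid_words)

-- ===== LEMMAS AND PROOFS =====

theorem pv_lower_mem_ascii (c : Char) (h : ('a' ≤ c && c ≤ 'z') = true) : c ∈ pvAsciiLowercase := by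
  have hb : 97 ≤ c.toNat ∧ c.toNat ≤ 122 := by
    simp [Char.le_def, UInt32.le_iff_toNat_le] at h; exact ⟨h.1, h.2⟩
  obtain ⟨h1, h2⟩ := hb
  have hg : ∀ n : Fin 26, Char.ofNat (97 + n.val) ∈ pvAsciiLowercase := by decide
  have hm := hg ⟨c.toNat - 97, by omega⟩
  have he : 97 + (c.toNat - 97) = c.toNat := by omega
  simp only at hm
  rw [he] at hm
  rwa [Char.ofNat_toNat c] at hm

theorem pv_ascii_lower : ∀ c ∈ pvAsciiLowercase, ('a' ≤ c && c ≤ 'z') = true := by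
  have h : (pvAsciiLowercase.all (fun c => 'a' ≤ c && c ≤ 'z')) = true := by rfl
  exact fun c hc => List.all_eq_true.mp h c hc

theorem pv_ascii_pairwise : pvAsciiLowercase.Pairwise (· < ·) := by
  apply List.IsChain.pairwise
  decide

theorem pv_cons_eq_dropLast_append (c : Char) (rest : List Char) :
    c :: rest = (c :: rest).dropLast ++ [rest.getLastD c] := by
  induction rest generalizing c with
  | nil => rfl
  | cons d t ih =>
    rw [List.getLastD_cons]
    calc c :: d :: t = c :: ((d :: t).dropLast ++ [t.getLastD d]) := by rw [← ih d]
      _ = (c :: d :: t).dropLast ++ [t.getLastD d] := by simp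

theorem pv_ofList_eq (l : List Char) (s : String) : String.ofList l = s ↔ l = s.toList := by
  rw [← String.toList_inj]; simp

theorem pv_step_mem_fst
    (m : PySem.Dict String (PySem.Set Char) × PySem.Dict String (PySem.Set Char))
    (v : String) (w : String) (c : Char) :
    c ∈ ((pvIndexStep m v).1.getD w PySem.Set.empty) ↔
      c ∈ m.1.getD w PySem.Set.empty ∨
        (('a' ≤ c && c ≤ 'z') = true ∧ String.ofList (c :: w.toList) = v) := by
  rw [pv_ofList_eq]
  rcases hv : v.toList with _ | ⟨c', rest⟩ <;> simp only [pvIndexStep, hv]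
  · simp
  · by_cases hlc : ('a' ≤ c' && c' ≤ 'z') = true
    · by_cases hw : w = String.ofList rest
      · subst hw
        rw [if_pos hlc, PySem.Dict.getD_modify_self, PySem.Set.mem_add]
        simp only [String.toList_ofList, List.cons.injEq, and_true]
        constructor
        · rintro (h | rfl)
          · exact Or.inl h
          · exact Or.inr ⟨hlc, rfl⟩
        · rintro (h | ⟨_, rfl⟩)
          · exact Or.inl h
          · exact Or.inr rfl
      · rw [if_pos hlc, PySem.Dict.getD_modify_of_ne _ _ _ hw]
        have : w.toList ≠ rest := fun h => hw (by rw [← String.toList_inj]; simpa using h)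
        simp [this]
    · rw [if_neg hlc]
      have : ∀ h : c = c', False → True := fun _ _ => trivial
      constructor
      · exact Or.inl
      · rintro (h | ⟨hl, rfl, _⟩)
        · exact h
        · exact absurd hl hlc

theorem pv_step_mem_snd
    (m : PySem.Dict String (PySem.Set Char) × PySem.Dict String (PySem.Set Char))
    (v : String) (w : String) (c : Char) :
    c ∈ ((pvIndexStep m v).2.getD w PySem.Set.empty) ↔
      c ∈ m.2.getD w PySem.Set.empty ∨
        (('a' ≤ c && c ≤ 'z') = true ∧ String.ofList (w.toList ++ [c]) = v) := by
  rw [pv_ofList_eq]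
  rcases hv : v.toList with _ | ⟨c', rest⟩ <;> simp only [pvIndexStep, hv]
  · simp
  · have hcond : ∀ ws : List Char, (ws ++ [c] = c' :: rest) ↔ (ws = (c' :: rest).dropLast ∧ c = rest.getLastD c') := by
      intro ws
      conv_lhs => rw [pv_cons_eq_dropLast_append c' rest]
      rw [List.append_singleton_inj]
    rw [hcond]
    by_cases hlc : ('a' ≤ rest.getLastD c' && rest.getLastD c' ≤ 'z') = true
    · by_cases hw : w = String.ofList ((c' :: rest).dropLast)
      · subst hw
        rw [if_pos hlc, PySem.Dict.getD_modify_self, PySem.Set.mem_add]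
        have hlc' : 'a' ≤ rest.getLastD c' ∧ rest.getLastD c' ≤ 'z' := by simpa using hlc
        have himp : c = rest.getLastD c' → ('a' ≤ c ∧ c ≤ 'z') := fun hx => hx ▸ hlc'
        simp only [String.toList_ofList, true_and, Bool.and_eq_true, decide_eq_true_eq]
        tauto
      · rw [if_pos hlc, PySem.Dict.getD_modify_of_ne _ _ _ hw]
        have : w.toList ≠ (c' :: rest).dropLast := fun h => hw (by rw [← String.toList_inj]; simpa using h)
        simp [this]
    · rw [if_neg hlc]
      constructor
      · exact Or.inl
      · rintro (h | ⟨hl, _, rfl⟩)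
        · exact h
        · exact absurd hl hlc

theorem pv_step_nodup
    (m : PySem.Dict String (PySem.Set Char) × PySem.Dict String (PySem.Set Char))
    (v : String)
    (h1 : ∀ w : String, (m.1.getD w PySem.Set.empty).Nodup)
    (h2 : ∀ w : String, (m.2.getD w PySem.Set.empty).Nodup) :
    (∀ w : String, ((pvIndexStep m v).1.getD w PySem.Set.empty).Nodup)
    ∧ (∀ w : String, ((pvIndexStep m v).2.getD w PySem.Set.empty).Nodup) := by
  rcases hv : v.toList with _ | ⟨c', rest⟩ <;> simp only [pvIndexStep, hv]
  · exact ⟨h1, h2⟩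
  · constructor <;> intro w
    · by_cases hlc : ('a' ≤ c' && c' ≤ 'z') = true
      · rw [if_pos hlc]
        by_cases hw : w = String.ofList rest
        · subst hw
          rw [PySem.Dict.getD_modify_self]
          exact PySem.Set.nodup_add _ _ (h1 _)
        · rw [PySem.Dict.getD_modify_of_ne _ _ _ hw]; exact h1 w
      · rw [if_neg hlc]; exact h1 w
    · by_cases hlc : ('a' ≤ rest.getLastD c' && rest.getLastD c' ≤ 'z') = true
      · rw [if_pos hlc]
        by_cases hw : w = String.ofList ((c' :: rest).dropLast)
        · subst hw
          rw [PySem.Dict.getD_modify_self]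
          exact PySem.Set.nodup_add _ _ (h2 _)
        · rw [PySem.Dict.getD_modify_of_ne _ _ _ hw]; exact h2 w
      · rw [if_neg hlc]; exact h2 w

-- membership in the two indexes built by B's loop
theorem pv_build_mem (vws : List String)
    (m : PySem.Dict String (PySem.Set Char) × PySem.Dict String (PySem.Set Char)) :
    (∀ (w : String) (c : Char),
      c ∈ ((vws.foldl pvIndexStep m).1.getD w PySem.Set.empty) ↔
        c ∈ m.1.getD w PySem.Set.empty ∨
          (('a' ≤ c && c ≤ 'z') = true ∧ String.ofList (c :: w.toList) ∈ vws))
    ∧ (∀ (w : String) (c : Char),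
      c ∈ ((vws.foldl pvIndexStep m).2.getD w PySem.Set.empty) ↔
        c ∈ m.2.getD w PySem.Set.empty ∨
          (('a' ≤ c && c ≤ 'z') = true ∧ String.ofList (w.toList ++ [c]) ∈ vws)) := by
  induction vws generalizing m with
  | nil => simp
  | cons v rest ih =>
    simp only [List.foldl_cons]
    obtain ⟨ih1, ih2⟩ := ih (pvIndexStep m v)
    constructor <;> intro w c
    · rw [ih1 w c, pv_step_mem_fst]
      simp only [List.mem_cons]
      tauto
    · rw [ih2 w c, pv_step_mem_snd]
      simp only [List.mem_cons]
      tauto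

-- the sets stored in the indexes have no duplicates
theorem pv_build_nodup (vws : List String)
    (m : PySem.Dict String (PySem.Set Char) × PySem.Dict String (PySem.Set Char))
    (h1 : ∀ w : String, (m.1.getD w PySem.Set.empty).Nodup)
    (h2 : ∀ w : String, (m.2.getD w PySem.Set.empty).Nodup) :
    (∀ w : String, ((vws.foldl pvIndexStep m).1.getD w PySem.Set.empty).Nodup)
    ∧ (∀ w : String, ((vws.foldl pvIndexStep m).2.getD w PySem.Set.empty).Nodup) := by
  induction vws generalizing m with
  | nil => exact ⟨h1, h2⟩
  | cons v rest ih =>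
    simp only [List.foldl_cons]
    obtain ⟨s1, s2⟩ := pv_step_nodup m v h1 h2
    exact ih (pvIndexStep m v) s1 s2

-- the sorted lookup in B's index is exactly A's filtered alphabet scan
theorem pv_sorted_suffix (vws : List String) (word : String) :
    PySem.List.sorted ((vws.foldl pvIndexStep (PySem.Dict.empty, PySem.Dict.empty)).1.getD word PySem.Set.empty) (fun x => x) false
      = pvAsciiLowercase.filter (fun c => vws.contains (String.ofList (c :: word.toList))) := by
  have hbase : ∀ w : String, ((PySem.Dict.empty (κ := String) (ν := PySem.Set Char)).getD w PySem.Set.empty).Nodup := by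
    intro w; rw [PySem.Dict.getD_empty]; exact List.nodup_nil
  have hmem := (pv_build_mem vws (PySem.Dict.empty, PySem.Dict.empty)).1 word
  have hnd := (pv_build_nodup vws (PySem.Dict.empty, PySem.Dict.empty) hbase hbase).1 word
  have hfp : (pvAsciiLowercase.filter (fun c => vws.contains (String.ofList (c :: word.toList)))).Pairwise (· < ·) :=
    pv_ascii_pairwise.filter _
  apply PySem.List.sorted_eq_of_perm_of_pairwise_lt _ _ _ _ hfp
  rw [List.perm_ext_iff_of_nodup (hfp.imp ne_of_lt) hnd]
  intro c
  rw [hmem c, List.mem_filter]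
  simp only [PySem.Dict.getD_empty]
  constructor
  · rintro ⟨hc, hv⟩
    exact Or.inr ⟨pv_ascii_lower c hc, List.contains_iff_mem.mp hv⟩
  · rintro (h | ⟨hl, hv⟩)
    · exact absurd h (List.not_mem_nil)
    · exact ⟨pv_lower_mem_ascii c hl, List.contains_iff_mem.mpr hv⟩

theorem pv_sorted_prefix (vws : List String) (word : String) :
    PySem.List.sorted ((vws.foldl pvIndexStep (PySem.Dict.empty, PySem.Dict.empty)).2.getD word PySem.Set.empty) (fun x => x) false
      = pvAsciiLowercase.filter (fun c => vws.contains (String.ofList (word.toList ++ [c]))) := by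
  have hbase : ∀ w : String, ((PySem.Dict.empty (κ := String) (ν := PySem.Set Char)).getD w PySem.Set.empty).Nodup := by
    intro w; rw [PySem.Dict.getD_empty]; exact List.nodup_nil
  have hmem := (pv_build_mem vws (PySem.Dict.empty, PySem.Dict.empty)).2 word
  have hnd := (pv_build_nodup vws (PySem.Dict.empty, PySem.Dict.empty) hbase hbase).2 word
  have hfp : (pvAsciiLowercase.filter (fun c => vws.contains (String.ofList (word.toList ++ [c])))).Pairwise (· < ·) :=
    pv_ascii_pairwise.filter _
  apply PySem.List.sorted_eq_of_perm_of_pairwise_lt _ _ _ _ hfp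
  rw [List.perm_ext_iff_of_nodup (hfp.imp ne_of_lt) hnd]
  intro c
  rw [hmem c, List.mem_filter]
  simp only [PySem.Dict.getD_empty]
  constructor
  · rintro ⟨hc, hv⟩
    exact Or.inr ⟨pv_ascii_lower c hc, List.contains_iff_mem.mp hv⟩
  · rintro (h | ⟨hl, hv⟩)
    · exact absurd h (List.not_mem_nil)
    · exact ⟨pv_lower_mem_ascii c hl, List.contains_iff_mem.mpr hv⟩

-- ===== VERDICT (by name: the statement is the Claim_ definition above) =====
theorem generate_three_letter_words_spec : Claim_equal_generate_three_letter_words := by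
  intro tws vws _
  unfold Spec_generate_three_letter_words generate_three_letter_words generate_three_letter_words_alt
  simp only [pv_sorted_suffix vws, pv_sorted_prefix vws, List.append_assoc]
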